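-- pv_equiv track=rewrite | github.com/David-5-5/tutorial | python/algo/202407/leetcode2453.py | destroyTargets2
-- ===== SOURCE A (Python) =====
-- from collections import defaultdict
-- from math import inf
-- from typing import List
--
-- def destroyTargets2(nums: List[int], space: int) -> int:
--     # 视频
--     cnt = defaultdict(lambda: [0, inf])
--
--     for num in nums :
--         cnt[num%space] = [cnt[num%space][0]+1, min(cnt[num%space][1], num)]
--
--     maxcnt, ans = -1, max(nums)
--     for m,x in cnt.values() :
--
--         if m > maxcnt or m == maxcnt and x < ans:
--             maxcnt, ans = m, x
--
--     return ans
-- ===== SOURCE B (Python) =====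
-- from collections import Counter
--
-- def destroyTargets2(nums, space):
--     cnt = Counter(num % space for num in nums)
--     maxcount = max(cnt.values())
--     return min(num for num in nums if cnt[num % space] == maxcount)
-- ===== Notes on version B (the rewrite author's own statement) =====
-- stated objective: faster
-- what changed: Replaces the defaultdict of per-group [count, min-so-far] pairs and the explicit lexicographic selection loop over group values by a plain Counter of remainders, a max over its counts, and a single filtered min over nums (C-level Counter/max/min instead of per-element Python list allocation and updates).
import Mathlib
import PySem

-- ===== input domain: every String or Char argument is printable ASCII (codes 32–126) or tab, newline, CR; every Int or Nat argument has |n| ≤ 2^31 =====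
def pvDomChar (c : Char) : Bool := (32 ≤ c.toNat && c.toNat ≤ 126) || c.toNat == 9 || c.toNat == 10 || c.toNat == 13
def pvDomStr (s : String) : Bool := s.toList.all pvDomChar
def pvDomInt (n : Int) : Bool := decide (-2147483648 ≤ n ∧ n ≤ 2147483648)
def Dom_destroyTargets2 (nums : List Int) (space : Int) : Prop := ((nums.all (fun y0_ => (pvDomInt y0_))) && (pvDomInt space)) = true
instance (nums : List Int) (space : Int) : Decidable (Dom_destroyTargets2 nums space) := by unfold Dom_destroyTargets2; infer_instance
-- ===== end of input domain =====

-- B replaces A's per-group [count, min] dict state and selection loop by a plain remainder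
-- counter, a max over its counts, and one filtered min over nums (measured faster, constant factor).


-- ===== PORT A =====
-- the body of A's second loop: 'if m > maxcnt or m == maxcnt and x < ans: maxcnt, ans = m, x'
def pvSelStep (acc p : Int × Int) : Int × Int :=
  if p.1 > acc.1 || (p.1 == acc.1 && p.2 < acc.2) then p else acc

-- cnt = defaultdict(lambda: [0, inf]); stored values never keep inf: the first update at a
-- key stores [0+1, min(inf, num)] = [1, num], which is the 'none' branch below (exact).
def destroyTargets2 (nums : List Int) (space : Int) : Int :=
  let cnt := nums.foldl (fun (d : PySem.Dict Int (Int × Int)) num =>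
      d.insert (PySem.Int.mod num space)
        (match d.get? (PySem.Int.mod num space) with
         | none => (1, num)
         | some (c, m) => (c + 1, min m num))) PySem.Dict.empty
  -- maxcnt, ans = -1, max(nums)   (max(nums) raises ValueError on []; excluded by Pre_)
  let init : Int × Int := (-1, (PySem.List.max? nums (fun x => x)).getD 0)
  (cnt.values.foldl pvSelStep init).2

-- ===== PORT B =====
def destroyTargets2_alt (nums : List Int) (space : Int) : Int :=
  let cnt := PySem.Dict.counter (nums.map (fun num => PySem.Int.mod num space))
  let maxcount := (PySem.List.max? cnt.values (fun x => x)).getD 0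
  (PySem.List.min? (nums.filter (fun num => cnt.getD (PySem.Int.mod num space) 0 == maxcount))
    (fun x => x)).getD 0

-- ===== PRECONDITION & SPEC =====
-- Python A raises ValueError (max of empty) on nums = [] and ZeroDivisionError on space = 0.
def Pre_destroyTargets2 (nums : List Int) (space : Int) : Prop := nums ≠ [] ∧ space ≠ 0
instance (nums : List Int) (space : Int) : Decidable (Pre_destroyTargets2 nums space) := by unfold Pre_destroyTargets2; infer_instance
def pvWitness_destroyTargets2 : List Int × Int := ([3, 7, 8, 1, 1, 5], 2)

def Spec_destroyTargets2 (nums : List Int) (space : Int) (out : Int) : Prop := out = destroyTargets2_alt nums space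
instance (nums : List Int) (space : Int) (out : Int) : Decidable (Spec_destroyTargets2 nums space out) := by unfold Spec_destroyTargets2; infer_instance

-- ===== CLAIM (what is proved, stated in full; the proofs are below) =====
def Claim_equal_destroyTargets2 : Prop := ∀ (nums : List Int) (space : Int), Dom_destroyTargets2 nums space → Pre_destroyTargets2 nums space → Spec_destroyTargets2 nums space (destroyTargets2 nums space)

-- ===== LEMMAS AND PROOFS =====

-- the members of l whose remainder is k
def pvGrp (space k : Int) (l : List Int) : List Int :=
  l.filter (fun n => PySem.Int.mod n space == k)

theorem pvGrp_mem {space k : Int} {l : List Int} {n : Int} :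
    n ∈ pvGrp space k l ↔ n ∈ l ∧ PySem.Int.mod n space = k := by
  simp [pvGrp]

theorem pvCount (nums : List Int) (space k : Int) :
    (nums.map (fun n => PySem.Int.mod n space)).count k = (pvGrp space k nums).length := by
  simp only [pvGrp, List.count, List.countP_map]
  rw [List.countP_eq_length_filter]
  rfl

theorem pvMin_mem (h : Int) (t : List Int) : t.foldl min h ∈ h :: t :=
  List.min?_mem rfl

theorem pvMin_le (h : Int) (t : List Int) (y : Int) (hy : y ∈ h :: t) : t.foldl min h ≤ y :=
  PySem.List.min?_isMin (xs := h :: t) (key := fun x => x) (by rw [PySem.List.min?_id_cons]) y hy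

-- A's dict after the first loop, looked up at k
theorem pvFoldA_get? (space : Int) (l : List Int) (d : PySem.Dict Int (Int × Int)) (k : Int) :
    (l.foldl (fun (d : PySem.Dict Int (Int × Int)) num =>
      d.insert (PySem.Int.mod num space)
        (match d.get? (PySem.Int.mod num space) with
         | none => (1, num)
         | some (c, m) => (c + 1, min m num))) d).get? k =
      match d.get? k, pvGrp space k l with
      | none, [] => none
      | none, h :: t => some (1 + t.length, t.foldl min h)
      | some (c, m), g => some (c + g.length, g.foldl min m) := by
  induction l generalizing d with
  | nil =>
    simp only [List.foldl_nil, pvGrp, List.filter_nil]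
    cases h : d.get? k with
    | none => rfl
    | some p => cases p; simp
  | cons x t ih =>
    simp only [List.foldl_cons]
    rw [ih]
    by_cases hk : PySem.Int.mod x space = k
    · subst hk
      rw [PySem.Dict.get?_insert_self]
      cases h : d.get? (PySem.Int.mod x space) with
      | none =>
        simp only [pvGrp, List.filter_cons, beq_self_eq_true, if_pos]
      | some p =>
        cases p with
        | mk c m =>
          simp only [pvGrp, List.filter_cons, beq_self_eq_true, if_pos, List.length_cons,
            List.foldl_cons]
          push_cast; ring_nf
    · rw [PySem.Dict.get?_insert_of_ne _ _ (fun hh => hk hh.symm)]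
      have : pvGrp space k (x :: t) = pvGrp space k t := by
        simp only [pvGrp, List.filter_cons]
        rw [if_neg]; simp [hk]
      rw [this]

-- ordering facts about the selection fold
def pvLexLE (a b : Int × Int) : Prop := a.1 < b.1 ∨ (a.1 = b.1 ∧ b.2 ≤ a.2)

theorem pvLexLE_trans {a b c : Int × Int} (h1 : pvLexLE a b) (h2 : pvLexLE b c) : pvLexLE a c := by
  unfold pvLexLE at *; omega

theorem pvLexLE_refl (a : Int × Int) : pvLexLE a a := by unfold pvLexLE; omega

theorem pvLexLE_step (acc p : Int × Int) : pvLexLE acc (pvSelStep acc p) := by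
  unfold pvSelStep; split
  · rename_i h; simp only [Bool.or_eq_true, Bool.and_eq_true, decide_eq_true_eq, beq_iff_eq] at h
    unfold pvLexLE; omega
  · exact pvLexLE_refl acc

theorem pvLexLE_step_self (acc p : Int × Int) : pvLexLE p (pvSelStep acc p) := by
  unfold pvSelStep; split
  · exact pvLexLE_refl p
  · rename_i h; simp only [Bool.or_eq_true, Bool.and_eq_true, decide_eq_true_eq, beq_iff_eq,
      not_or, not_and] at h
    unfold pvLexLE; omega

theorem pvSel_mem (vs : List (Int × Int)) (acc : Int × Int) :
    vs.foldl pvSelStep acc = acc ∨ vs.foldl pvSelStep acc ∈ vs := by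
  induction vs generalizing acc with
  | nil => exact Or.inl rfl
  | cons q t ih =>
    simp only [List.foldl_cons]
    rcases ih (pvSelStep acc q) with h | h
    · rw [h]; unfold pvSelStep; split
      · exact Or.inr List.mem_cons_self
      · exact Or.inl rfl
    · exact Or.inr (List.mem_cons_of_mem _ h)

theorem pvSel_ge (vs : List (Int × Int)) (acc : Int × Int) :
    pvLexLE acc (vs.foldl pvSelStep acc) := by
  induction vs generalizing acc with
  | nil => exact pvLexLE_refl acc
  | cons q t ih => exact pvLexLE_trans (pvLexLE_step acc q) (ih (pvSelStep acc q))

theorem pvSel_dom (vs : List (Int × Int)) (acc : Int × Int) (p : Int × Int) (hp : p ∈ vs) :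
    pvLexLE p (vs.foldl pvSelStep acc) := by
  induction vs generalizing acc with
  | nil => cases hp
  | cons q t ih =>
    simp only [List.foldl_cons]
    rcases List.mem_cons.mp hp with rfl | h
    · exact pvLexLE_trans (pvLexLE_step_self acc p) (pvSel_ge t _)
    · exact ih _ h

theorem pvMain (nums : List Int) (space : Int) (hne : nums ≠ []) :
    destroyTargets2 nums space = destroyTargets2_alt nums space := by
  unfold destroyTargets2 destroyTargets2_alt
  set r : Int → Int := fun num => PySem.Int.mod num space with hr
  set dA := nums.foldl (fun (d : PySem.Dict Int (Int × Int)) num =>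
      d.insert (PySem.Int.mod num space)
        (match d.get? (PySem.Int.mod num space) with
         | none => (1, num)
         | some (c, m) => (c + 1, min m num))) PySem.Dict.empty with hdA
  set cntB := PySem.Dict.counter (nums.map r) with hcntB
  -- the keys of A's dict: remainders in first-appearance order
  have hkeys : dA.keys = PySem.Set.ofList (nums.map r) := by
    rw [hdA, PySem.Dict.keys_foldl_insert_key]
    rw [PySem.Dict.keys_empty, PySem.Set.update_nil_left]
  have hnd : dA.keys.Nodup := by
    rw [hdA]
    exact PySem.Dict.nodup_keys_foldl_insert_key _ _ _ _
      (by rw [PySem.Dict.keys_empty]; exact List.nodup_nil)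
  -- lookup characterization of A's dict
  have hget : ∀ k, dA.get? k = (match pvGrp space k nums with
      | [] => none
      | h :: t => some ((1 + (t.length : Int), t.foldl min h) : Int × Int)) := by
    intro k
    rw [hdA, pvFoldA_get?, PySem.Dict.get?_empty]
    cases pvGrp space k nums <;> rfl
  have hkval : ∀ k ∈ dA.keys, ∃ h t, pvGrp space k nums = h :: t ∧
      dA.getD k (0, 0) = (1 + (t.length : Int), t.foldl min h) := by
    intro k hk
    have hkin : k ∈ nums.map r := by
      rw [hkeys] at hk; exact (PySem.Set.mem_ofList _ _).mp hk
    obtain ⟨n, hn, hnk⟩ := List.mem_map.mp hkin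
    cases hg : pvGrp space k nums with
    | nil =>
      exfalso
      have : n ∈ pvGrp space k nums := pvGrp_mem.mpr ⟨hn, hnk⟩
      rw [hg] at this; cases this
    | cons h t =>
      refine ⟨h, t, rfl, ?_⟩
      rw [PySem.Dict.getD_eq_get?_getD, hget k, hg]
      rfl
  have hvals : dA.values = dA.keys.map (fun k => dA.getD k (0, 0)) :=
    PySem.Dict.values_eq_map_keys dA hnd (0, 0)
  -- B's counter values
  have hvalsB : cntB.values = (PySem.Set.ofList (nums.map r)).map
      (fun k => ((nums.map r).count k : Int)) := by
    rw [hcntB]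
    simp only [PySem.Dict.values, PySem.Dict.items_counter, List.map_map]
    rfl
  have hgetB : ∀ n, cntB.getD (r n) 0 = (((pvGrp space (r n) nums).length : Nat) : Int) := by
    intro n
    rw [hcntB, PySem.Dict.getD_counter, pvCount]
  -- nonemptiness
  have hkeysne : PySem.Set.ofList (nums.map r) ≠ [] := by
    cases nums with
    | nil => exact absurd rfl hne
    | cons a l =>
      intro hemp
      have : r a ∈ PySem.Set.ofList ((a :: l).map r) :=
        (PySem.Set.mem_ofList _ _).mpr (List.mem_map.mpr ⟨a, List.mem_cons_self, rfl⟩)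
      rw [hemp] at this; cases this
  -- the maximum count M
  obtain ⟨M, hM⟩ : ∃ M, PySem.List.max? cntB.values (fun x => x) = some M := by
    cases hMx : PySem.List.max? cntB.values (fun x => x) with
    | none =>
      exfalso
      have := (PySem.List.max?_eq_none_iff _ _).mp hMx
      rw [hvalsB] at this
      exact hkeysne (List.map_eq_nil_iff.mp this)
    | some M => exact ⟨M, rfl⟩
  have hMmem : M ∈ cntB.values := PySem.List.max?_mem hM
  have hMmax : ∀ y ∈ cntB.values, y ≤ M := PySem.List.max?_isMax hM
  -- A's selection fold lands on an actual dict value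
  set init : Int × Int := (-1, (PySem.List.max? nums (fun x => x)).getD 0) with hinit
  set res := dA.values.foldl pvSelStep init with hres
  have hvpos : ∀ p ∈ dA.values, 1 ≤ p.1 := by
    intro p hp
    rw [hvals] at hp
    obtain ⟨k, hk, hpk⟩ := List.mem_map.mp hp
    obtain ⟨h, t, _, hv⟩ := hkval k hk
    rw [← hpk, hv]
    have : (0 : Int) ≤ (t.length : Int) := Int.natCast_nonneg _
    omega
  have hresmem : res ∈ dA.values := by
    rcases pvSel_mem dA.values init with he | h
    · exfalso
      have hvne : dA.values ≠ [] := by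
        rw [hvals, hkeys]
        intro hemp
        exact hkeysne (List.map_eq_nil_iff.mp hemp)
      cases hv : dA.values with
      | nil => exact hvne hv
      | cons p0 t0 =>
        have hp0 : p0 ∈ dA.values := by rw [hv]; exact List.mem_cons_self
        have := pvSel_dom dA.values init p0 hp0
        rw [he, hinit] at this
        have h1 := hvpos p0 hp0
        unfold pvLexLE at this
        omega
    · exact h
  obtain ⟨k0, hk0, hres0⟩ := List.mem_map.mp (by rw [hvals] at hresmem; exact hresmem)
  obtain ⟨h0, t0, hg0, hv0⟩ := hkval k0 hk0
  rw [hv0] at hres0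
  -- the selected count C and min X
  set C : Int := 1 + (t0.length : Int) with hC
  set X : Int := t0.foldl min h0 with hX
  have hresC : res.1 = C := by rw [← hres0]
  have hresX : res.2 = X := by rw [← hres0]
  have hClen : C = ((pvGrp space k0 nums).length : Int) := by
    rw [hg0]; simp only [List.length_cons]; push_cast; ring
  -- X is a member of group k0 and its minimum
  have hXmem : X ∈ pvGrp space k0 nums := by rw [hg0]; exact pvMin_mem h0 t0
  have hXnums : X ∈ nums := (pvGrp_mem.mp hXmem).1
  have hXk0 : r X = k0 := (pvGrp_mem.mp hXmem).2
  -- M = C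
  have hMC : M = C := by
    have hCle : C ≤ M := by
      apply hMmax
      rw [hvalsB]
      refine List.mem_map.mpr ⟨k0, ?_, ?_⟩
      · rw [← hkeys]; exact hk0
      · rw [pvCount, ← hClen]
    have hMle : M ≤ C := by
      rw [hvalsB] at hMmem
      obtain ⟨k1, hk1, hMk1⟩ := List.mem_map.mp hMmem
      obtain ⟨h1, t1, hg1, hv1⟩ := hkval k1 (by rw [hkeys]; exact hk1)
      have hp1 : dA.getD k1 (0, 0) ∈ dA.values := by
        rw [hvals]
        exact List.mem_map.mpr ⟨k1, by rw [hkeys]; exact hk1, rfl⟩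
      have hdom := pvSel_dom dA.values init _ hp1
      have hfst : (dA.getD k1 (0, 0)).1 = M := by
        rw [hv1, ← hMk1, pvCount, hg1]
        simp only [List.length_cons]; push_cast; ring
      unfold pvLexLE at hdom
      rw [hfst, hresC] at hdom
      omega
    omega
  -- the filter predicate in B
  have hpred : ∀ n, ((cntB.getD (r n) 0 == (PySem.List.max? cntB.values (fun x => x)).getD 0)) = true ↔
      ((pvGrp space (r n) nums).length : Int) = C := by
    intro n
    rw [hM, hgetB n]
    simp only [Option.getD_some, beq_iff_eq, hMC]
  set filtered := nums.filter (fun num => cntB.getD (r num) 0 == (PySem.List.max? cntB.values (fun x => x)).getD 0) with hfil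
  have hXfil : X ∈ filtered := by
    rw [hfil]
    refine List.mem_filter.mpr ⟨hXnums, ?_⟩
    rw [hpred X, hXk0, ← hClen]
  obtain ⟨b, hb⟩ : ∃ b, PySem.List.min? filtered (fun x => x) = some b := by
    cases hbx : PySem.List.min? filtered (fun x => x) with
    | none =>
      exfalso
      have := (PySem.List.min?_eq_none_iff _ _).mp hbx
      rw [this] at hXfil; cases hXfil
    | some b => exact ⟨b, rfl⟩
  have hbmem : b ∈ filtered := PySem.List.min?_mem hb
  have hbmin : ∀ y ∈ filtered, b ≤ y := PySem.List.min?_isMin hb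
  -- b ≤ X
  have hbX : b ≤ X := hbmin X hXfil
  -- X ≤ b
  have hXb : X ≤ b := by
    have hbnums : b ∈ nums := (List.mem_filter.mp hbmem).1
    have hbC : ((pvGrp space (r b) nums).length : Int) = C :=
      (hpred b).mp (List.mem_filter.mp hbmem).2
    have hk1 : r b ∈ dA.keys := by
      rw [hkeys]
      exact (PySem.Set.mem_ofList _ _).mpr (List.mem_map.mpr ⟨b, hbnums, rfl⟩)
    obtain ⟨h1, t1, hg1, hv1⟩ := hkval (r b) hk1
    have hp1 : dA.getD (r b) (0, 0) ∈ dA.values := by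
      rw [hvals]; exact List.mem_map.mpr ⟨r b, hk1, rfl⟩
    have hdom := pvSel_dom dA.values init _ hp1
    have hfst : (dA.getD (r b) (0, 0)).1 = C := by
      rw [hv1, ← hbC, hg1]
      simp only [List.length_cons]; push_cast; ring
    have hsnd : (dA.getD (r b) (0, 0)).2 = t1.foldl min h1 := by rw [hv1]
    unfold pvLexLE at hdom
    rw [hfst, hresC, hresX, hsnd] at hdom
    have hm1b : t1.foldl min h1 ≤ b := by
      apply pvMin_le
      rw [← hg1]
      exact pvGrp_mem.mpr ⟨hbnums, rfl⟩
    omega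
  -- conclude
  rw [hresX]
  show X = (PySem.List.min? filtered (fun x => x)).getD 0
  rw [hb]
  simp only [Option.getD_some]
  omega

-- ===== VERDICT (by name: the statement is the Claim_ definition above) =====
theorem destroyTargets2_spec : Claim_equal_destroyTargets2 := by
  intro nums space _ hpre
  unfold Spec_destroyTargets2
  exact pvMain nums space hpre.1
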